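-- pv_equiv track=rewrite | github.com/hey339/signal-processing-exercises | Lzw.py | lzw_decode
-- ===== SOURCE A (Python) =====
-- def lzw_decode(encoded):
--     """LZW decoding"""
--     # Initialize dictionary
--     dictionary = {i: chr(i) for i in range(256)}
--     dict_size = 256
--
--     result = []
--     current = chr(encoded[0])
--     result.append(current)
--
--     for code in encoded[1:]:
--         if code in dictionary:
--             entry = dictionary[code]
--         elif code == dict_size:
--             entry = current + current[0]
--         else:
--             raise ValueError("Bad compressed code")
--
--         result.append(entry)
--         dictionary[dict_size] = current + entry[0]
--         dict_size += 1
--         current = entry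
--
--     return ''.join(result)
-- ===== SOURCE B (Python) =====
-- def lzw_decode(encoded):
--     """LZW decoding via a reference dictionary: entry 256+k is stored as
--     (parent handle, appended char) and resolved by walking the parent chain;
--     a handle is either a single character (a root) or an entry index."""
--     parent = []   # parent handle of entry 256+k: a char (root) or an int index
--     lastch = []   # char appended by entry 256+k
--     firstch = []  # first char of the string named by entry 256+k
--
--     def resolve(h):
--         chars = []
--         while isinstance(h, int):
--             chars.append(lastch[h])
--             h = parent[h]
--         chars.append(h)
--         chars.reverse()
--         return ''.join(chars)
--
--     prev_h = chr(encoded[0])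
--     prev_f = prev_h
--     out = [prev_h]
--     for code in encoded[1:]:
--         n = 256 + len(parent)
--         if 0 <= code < 256:
--             s = chr(code)
--             f = s
--             h = s
--         elif 256 <= code < n:
--             k = code - 256
--             s = resolve(k)
--             f = firstch[k]
--             h = k
--         elif code == n:
--             s = resolve(prev_h) + prev_f
--             f = prev_f
--             h = len(parent)
--         else:
--             raise ValueError("Bad compressed code")
--         out.append(s)
--         parent.append(prev_h)
--         lastch.append(s[0])
--         firstch.append(prev_f)
--         prev_h = h
--         prev_f = f
--     return ''.join(out)
-- ===== Notes on version B (the rewrite author's own statement) =====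
-- stated objective: alternative
-- what changed: Replaces A's dictionary of fully materialized strings with reference entries (parent handle, appended char): each code is decoded by walking the parent chain and reversing, with per-entry caches of the first character, so no entry string is ever stored.
import Mathlib
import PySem

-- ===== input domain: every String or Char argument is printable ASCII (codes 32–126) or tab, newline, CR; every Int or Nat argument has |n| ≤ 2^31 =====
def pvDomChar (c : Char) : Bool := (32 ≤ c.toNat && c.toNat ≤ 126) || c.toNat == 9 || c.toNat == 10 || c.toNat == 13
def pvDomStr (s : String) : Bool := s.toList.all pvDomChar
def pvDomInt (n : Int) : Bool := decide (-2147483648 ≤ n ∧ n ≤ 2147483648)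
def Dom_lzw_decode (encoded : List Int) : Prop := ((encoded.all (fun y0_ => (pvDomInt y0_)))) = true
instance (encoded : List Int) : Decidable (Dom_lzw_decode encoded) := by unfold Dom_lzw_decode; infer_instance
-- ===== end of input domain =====

-- B replaces A's dictionary of materialized strings by reference entries (parent handle, appended
-- char) resolved by walking the parent chain, with a cache of each entry's first character
-- (objective: alternative). Python strings are List Char inside both ports; a Python handle
-- (char or int index) is Char ⊕ Nat.

-- ===== PORT A =====
def lzwChr (i : Int) : Char := Char.ofNat i.toNat   -- chr(i); exact for 0 ≤ i < 0x110000, non-surrogate (Pre_)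

-- dictionary = {i: chr(i) for i in range(256)}
def lzwAInit : PySem.Dict Int (List Char) :=
  (PySem.List.pyRange 0 256 1).foldl (fun d i => d.insert i [lzwChr i]) PySem.Dict.empty

-- the for-loop over encoded[1:]; state (dictionary, dict_size, result, current);
-- entry[0]/current[0] is PySem.List.pyGetD _ 0 ' ' (never out of range when reached under Pre_);
-- the 'raise ValueError' branch returns the partial result (Pre_ excludes it)
def lzwALoop : List Int → PySem.Dict Int (List Char) → Int → List (List Char) → List Char → List (List Char)
  | [], _, _, result, _ => result
  | code :: rest, dict, size, result, current =>
    match dict.get? code with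
    | some entry =>
        lzwALoop rest (dict.insert size (current ++ [PySem.List.pyGetD entry 0 ' '])) (size + 1)
          (result ++ [entry]) entry
    | none =>
        if code = size then
          let entry := current ++ [PySem.List.pyGetD current 0 ' ']
          lzwALoop rest (dict.insert size (current ++ [PySem.List.pyGetD entry 0 ' '])) (size + 1)
            (result ++ [entry]) entry
        else result

def lzw_decode (encoded : List Int) : String :=
  match encoded with
  | [] => ""          -- encoded[0]: IndexError (outside Pre_)
  | e0 :: rest =>
    let current := [lzwChr e0]
    String.ofList (PySem.Chars.join [] (lzwALoop rest lzwAInit 256 [current] current))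

-- ===== PORT B =====
-- resolve(h): walk the parent chain appending chars, then reverse; the fuel argument is a
-- totality guard only — parent.length + 1 always suffices (each parent has a smaller index)
def lzwBResolve (parent : List (Char ⊕ Nat)) (lastC : List Char) : Nat → (Char ⊕ Nat) → List Char → List Char
  | 0, _, acc => acc.reverse
  | _ + 1, Sum.inl c, acc => (acc ++ [c]).reverse
  | fuel + 1, Sum.inr k, acc =>
      lzwBResolve parent lastC fuel (parent.getD k (Sum.inl ' ')) (acc ++ [lastC.getD k ' '])

-- the for-loop; state (parent, last, first, prev_h, prev_f, out);
-- the 'raise ValueError' branch returns the partial output (Pre_ excludes it)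
def lzwBLoop : List Int → List (Char ⊕ Nat) → List Char → List Char → (Char ⊕ Nat) → Char → List (List Char) → List (List Char)
  | [], _, _, _, _, _, out => out
  | code :: rest, parent, lastC, firstC, prevH, prevF, out =>
    let n : Int := 256 + (parent.length : Int)
    if 0 ≤ code ∧ code < 256 then
      let s := [lzwChr code]
      lzwBLoop rest (parent ++ [prevH]) (lastC ++ [PySem.List.pyGetD s 0 ' ']) (firstC ++ [prevF])
        (Sum.inl (lzwChr code)) (lzwChr code) (out ++ [s])
    else if 256 ≤ code ∧ code < n then
      let k := (code - 256).toNat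
      let s := lzwBResolve parent lastC (parent.length + 1) (Sum.inr k) []
      lzwBLoop rest (parent ++ [prevH]) (lastC ++ [PySem.List.pyGetD s 0 ' ']) (firstC ++ [prevF])
        (Sum.inr k) (firstC.getD k ' ') (out ++ [s])
    else if code = n then
      let s := lzwBResolve parent lastC (parent.length + 1) prevH [] ++ [prevF]
      lzwBLoop rest (parent ++ [prevH]) (lastC ++ [PySem.List.pyGetD s 0 ' ']) (firstC ++ [prevF])
        (Sum.inr parent.length) prevF (out ++ [s])
    else out

def lzw_decode_alt (encoded : List Int) : String :=
  match encoded with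
  | [] => ""          -- encoded[0]: IndexError (outside Pre_)
  | e0 :: rest =>
    let pf := lzwChr e0
    String.ofList (PySem.Chars.join [] (lzwBLoop rest [] [] [] (Sum.inl pf) pf [[pf]]))

-- ===== PRECONDITION & SPEC =====
-- Pre_ excludes exactly: (a) inputs on which A raises (empty list: IndexError; first code outside
-- chr's range 0..0x10FFFF: ValueError; a negative or too-large later code: ValueError); and
-- (b) a first code that is a UTF-16 surrogate, where A returns a string holding a lone surrogate,
-- which is not representable as a Lean String (see claim.json "cites").
def Pre_lzw_decode (encoded : List Int) : Prop :=
  encoded ≠ [] ∧ 0 ≤ encoded.headD 0 ∧ encoded.headD 0 < 1114112 ∧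
    ¬ (55296 ≤ encoded.headD 0 ∧ encoded.headD 0 < 57344) ∧
    ∀ p ∈ encoded.tail.zipIdx, 0 ≤ p.1 ∧ p.1 ≤ 256 + (p.2 : Int)
instance (encoded : List Int) : Decidable (Pre_lzw_decode encoded) := by
  unfold Pre_lzw_decode; infer_instance

def pvWitness_lzw_decode : List Int := [104, 101, 256, 258, 101]

def Spec_lzw_decode (encoded : List Int) (out : String) : Prop := out = lzw_decode_alt encoded
instance (encoded : List Int) (out : String) : Decidable (Spec_lzw_decode encoded out) := by
  unfold Spec_lzw_decode; infer_instance

-- ===== CLAIM (what is proved, stated in full; the proofs are below) =====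
def Claim_equal_lzw_decode : Prop :=
  ∀ (encoded : List Int), Dom_lzw_decode encoded → Pre_lzw_decode encoded →
    Spec_lzw_decode encoded (lzw_decode encoded)

-- ===== LEMMAS AND PROOFS =====

-- proof-side abbreviations: measure of a handle, canonical resolution, the string named by a code,
-- the first char of a handle, well-formed parent arrays
def lzwMu : (Char ⊕ Nat) → Nat
  | Sum.inl _ => 0
  | Sum.inr k => k + 1

def lzwRes (parent : List (Char ⊕ Nat)) (lastC : List Char) (h : Char ⊕ Nat) : List Char :=
  lzwBResolve parent lastC (parent.length + 1) h []

def lzwF (firstC : List Char) : (Char ⊕ Nat) → Char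
  | Sum.inl c => c
  | Sum.inr k => firstC.getD k ' '

def lzwWF (parent : List (Char ⊕ Nat)) : Prop :=
  ∀ k, (h : k < parent.length) → lzwMu parent[k] ≤ k

lemma lzwBResolve_acc (parent : List (Char ⊕ Nat)) (lastC : List Char) :
    ∀ (fuel : Nat) (h : Char ⊕ Nat) (acc : List Char),
      lzwBResolve parent lastC fuel h acc = lzwBResolve parent lastC fuel h [] ++ acc.reverse := by
  intro fuel
  induction fuel with
  | zero => intro h acc; simp [lzwBResolve]
  | succ fuel ih =>
    intro h acc
    cases h with
    | inl c => simp [lzwBResolve]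
    | inr k =>
      simp only [lzwBResolve]
      rw [ih _ (acc ++ _), ih _ ([] ++ _)]
      simp

lemma lzwBResolve_fuel (parent : List (Char ⊕ Nat)) (lastC : List Char) (hwf : lzwWF parent) :
    ∀ (m : Nat) (h : Char ⊕ Nat) (acc : List Char) (f₁ f₂ : Nat),
      lzwMu h ≤ parent.length → lzwMu h ≤ m → lzwMu h < f₁ → lzwMu h < f₂ →
      lzwBResolve parent lastC f₁ h acc = lzwBResolve parent lastC f₂ h acc := by
  intro m
  induction m with
  | zero =>
    intro h acc f₁ f₂ hlen hm hf1 hf2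
    cases h with
    | inl c =>
      cases f₁ with
      | zero => omega
      | succ f₁ =>
        cases f₂ with
        | zero => omega
        | succ f₂ => rfl
    | inr k => simp [lzwMu] at hm
  | succ m ih =>
    intro h acc f₁ f₂ hlen hm hf1 hf2
    cases h with
    | inl c =>
      cases f₁ with
      | zero => simp [lzwMu] at hf1
      | succ f₁ =>
        cases f₂ with
        | zero => simp [lzwMu] at hf2
        | succ f₂ => rfl
    | inr k =>
      simp only [lzwMu] at hlen hm hf1 hf2
      cases f₁ with
      | zero => omega
      | succ f₁ =>
        cases f₂ with
        | zero => omega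
        | succ f₂ =>
          simp only [lzwBResolve]
          have hk : k < parent.length := by omega
          rw [List.getD_eq_getElem _ _ hk]
          have hwfk := hwf _ hk
          exact ih _ _ _ _ (by omega) (by omega) (by omega) (by omega)

lemma lzwBResolve_append (parent : List (Char ⊕ Nat)) (lastC : List Char) (hwf : lzwWF parent)
    (hlen : lastC.length = parent.length) (p : Char ⊕ Nat) (c : Char) :
    ∀ (fuel : Nat) (h : Char ⊕ Nat) (acc : List Char), lzwMu h ≤ parent.length →
      lzwBResolve (parent ++ [p]) (lastC ++ [c]) fuel h acc = lzwBResolve parent lastC fuel h acc := by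
  intro fuel
  induction fuel with
  | zero => intro h acc _; simp [lzwBResolve]
  | succ fuel ih =>
    intro h acc hμ
    cases h with
    | inl d => rfl
    | inr k =>
      simp only [lzwMu] at hμ
      have hk : k < parent.length := by omega
      simp only [lzwBResolve]
      rw [List.getD_append _ _ _ _ hk, List.getD_append _ _ _ _ (hlen ▸ hk)]
      rw [List.getD_eq_getElem _ _ hk]
      exact ih _ _ (le_trans (hwf _ hk) (by omega))

lemma lzwRes_append (parent : List (Char ⊕ Nat)) (lastC : List Char) (hwf : lzwWF parent)
    (hlen : lastC.length = parent.length) (p : Char ⊕ Nat) (c : Char) (h : Char ⊕ Nat)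
    (hμ : lzwMu h ≤ parent.length) :
    lzwRes (parent ++ [p]) (lastC ++ [c]) h = lzwRes parent lastC h := by
  unfold lzwRes
  rw [lzwBResolve_append parent lastC hwf hlen p c _ _ _ hμ]
  have hl : (parent ++ [p]).length = parent.length + 1 := by simp
  rw [hl]
  exact lzwBResolve_fuel parent lastC hwf parent.length h [] _ _ hμ hμ (by omega) (by omega)

lemma lzwRes_new (parent : List (Char ⊕ Nat)) (lastC : List Char) (hwf : lzwWF parent)
    (hlen : lastC.length = parent.length) (p : Char ⊕ Nat) (c : Char)
    (hμ : lzwMu p ≤ parent.length) :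
    lzwRes (parent ++ [p]) (lastC ++ [c]) (Sum.inr parent.length) = lzwRes parent lastC p ++ [c] := by
  unfold lzwRes
  have hl : (parent ++ [p]).length = parent.length + 1 := by simp
  rw [hl]
  show lzwBResolve _ _ (parent.length + 1 + 1) _ _ = _
  rw [show (parent.length + 1 + 1) = (parent.length + 1) + 1 from rfl]
  simp only [lzwBResolve]
  have e1 : (parent ++ [p]).getD parent.length (Sum.inl ' ') = p := by
    rw [List.getD_append_right _ _ _ _ (le_refl _)]; simp
  have e2 : (lastC ++ [c]).getD parent.length ' ' = c := by
    rw [← hlen, List.getD_append_right _ _ _ _ (le_refl _)]; simp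
  rw [e1, e2]
  rw [lzwBResolve_append parent lastC hwf hlen p c _ _ _ hμ]
  rw [lzwBResolve_acc]
  simp

lemma lzwRes_inl (parent : List (Char ⊕ Nat)) (lastC : List Char) (c : Char) :
    lzwRes parent lastC (Sum.inl c) = [c] := by
  simp [lzwRes, lzwBResolve]

lemma lzwAInit_get? (c : Int) :
    lzwAInit.get? c = if 0 ≤ c ∧ c < 256 then some [lzwChr c] else none := by
  have key : ∀ n : Nat,
      ((PySem.List.pyRange 0 (n : Int) 1).foldl (fun d i => d.insert i [lzwChr i]) PySem.Dict.empty).get? c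
        = if 0 ≤ c ∧ c < (n : Int) then some [lzwChr c] else none := by
    intro n
    induction n with
    | zero => simp [PySem.List.pyRange]
    | succ n ih =>
      have hr : PySem.List.pyRange 0 ((n : Int) + 1) 1 = PySem.List.pyRange 0 (n : Int) 1 ++ [(n : Int)] := by
        simpa using PySem.List.pyRange_one_succ_right (a := 0) (b := (n : Int)) (by omega)
      push_cast
      rw [hr, List.foldl_append]
      simp only [List.foldl]
      rw [PySem.Dict.get?_insert, ih]
      by_cases hc : c = (n : Int)
      · subst hc; simp
      · simp only [if_neg hc]
        by_cases h1 : 0 ≤ c ∧ c < (n : Int)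
        · rw [if_pos h1, if_pos ⟨h1.1, by omega⟩]
        · rw [if_neg h1, if_neg (by omega)]
  have h256 : ((256 : Int)) = ((256 : Nat) : Int) := by norm_num
  unfold lzwAInit
  rw [h256, key 256]


def lzwSB (parent : List (Char ⊕ Nat)) (lastC : List Char) (c : Int) : List Char :=
  if c < 256 then [lzwChr c] else lzwRes parent lastC (Sum.inr (c - 256).toNat)

lemma lzwWF_append (parent : List (Char ⊕ Nat)) (p : Char ⊕ Nat) (hwf : lzwWF parent)
    (hμ : lzwMu p ≤ parent.length) : lzwWF (parent ++ [p]) := by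
  intro k h
  by_cases hk : k < parent.length
  · rw [List.getElem_append_left hk]
    exact hwf k hk
  · have hl : k < parent.length + 1 := by simpa using h
    have hk' : k = parent.length := by omega
    subst hk'
    have hg : (parent ++ [p])[parent.length] = p := by simp
    rw [hg]
    exact hμ

lemma getD_zero_append (l : List Char) (a d : Char) (h : l ≠ []) :
    (l ++ [a]).getD 0 d = l.getD 0 d := by
  cases l with
  | nil => exact absurd rfl h
  | cons x xs => simp [List.getD]

lemma lzw_loop_eq :
    ∀ (codes : List Int) (dict : PySem.Dict Int (List Char)) (size : Int)
      (result : List (List Char)) (current : List Char)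
      (parent : List (Char ⊕ Nat)) (lastC firstC : List Char) (prevH : Char ⊕ Nat) (prevF : Char)
      (out : List (List Char)),
      size = 256 + (parent.length : Int) →
      lastC.length = parent.length → firstC.length = parent.length →
      result = out →
      lzwWF parent →
      lzwMu prevH ≤ parent.length →
      (∀ c : Int, dict.get? c = if 0 ≤ c ∧ c < size then some (lzwSB parent lastC c) else none) →
      current = lzwRes parent lastC prevH →
      (∀ k, k < parent.length →
        lzwRes parent lastC (Sum.inr k) ≠ [] ∧
          (lzwRes parent lastC (Sum.inr k)).getD 0 ' ' = firstC.getD k ' ') →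
      prevF = lzwF firstC prevH →
      lzwALoop codes dict size result current = lzwBLoop codes parent lastC firstC prevH prevF out := by
  intro codes
  induction codes with
  | nil =>
    intro dict size result current parent lastC firstC prevH prevF out
      hsize hlast hfirst hro hwf hμ hdict hcur hhead hpf
    simpa [lzwALoop, lzwBLoop] using hro
  | cons code rest ih =>
    intro dict size result current parent lastC firstC prevH prevF out
      hsize hlast hfirst hro hwf hμ hdict hcur hhead hpf
    -- the current string is nonempty and starts with prevF
    have hcurne : current ≠ [] ∧ current.getD 0 ' ' = prevF := by
      cases prevH with
      | inl c =>
        rw [hcur, lzwRes_inl]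
        exact ⟨by simp, by simp [List.getD, hpf, lzwF]⟩
      | inr k =>
        have hk : k < parent.length := by simpa [lzwMu] using hμ
        have hh := hhead k hk
        rw [hcur]
        exact ⟨hh.1, by rw [hh.2, hpf]; rfl⟩
    simp only [lzwALoop, lzwBLoop]
    by_cases hsmall : 0 ≤ code ∧ code < 256
    · -- single-char dictionary entry
      have hg : dict.get? code = some [lzwChr code] := by
        rw [hdict code, if_pos ⟨hsmall.1, by omega⟩, lzwSB, if_pos hsmall.2]
      rw [hg, if_pos hsmall]
      apply ih
      · simp; omega
      · simp [hlast]
      · simp [hfirst]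
      · rw [hro]
      · exact lzwWF_append parent prevH hwf hμ
      · simp [lzwMu]
      · intro c
        rw [PySem.Dict.get?_insert]
        by_cases hcs : c = size
        · rw [if_pos hcs, if_pos ⟨by omega, by omega⟩, lzwSB, if_neg (by omega)]
          have hi : (c - 256).toNat = parent.length := by omega
          rw [hi, lzwRes_new parent lastC hwf hlast prevH _ hμ, ← hcur]
        · rw [if_neg hcs, hdict c]
          by_cases hc2 : 0 ≤ c ∧ c < size
          · rw [if_pos hc2, if_pos ⟨hc2.1, by omega⟩]
            unfold lzwSB
            by_cases hc256 : c < 256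
            · rw [if_pos hc256, if_pos hc256]
            · rw [if_neg hc256, if_neg hc256,
                lzwRes_append parent lastC hwf hlast prevH _ _ (by simp [lzwMu]; omega)]
          · rw [if_neg hc2, if_neg (by omega)]
      · rw [lzwRes_inl]
      · intro k hk
        by_cases hkl : k < parent.length
        · rw [lzwRes_append parent lastC hwf hlast prevH _ _ (by simp [lzwMu]; omega)]
          have hold := hhead k hkl
          refine ⟨hold.1, ?_⟩
          rw [hold.2, List.getD_append _ _ _ _ (by omega : k < firstC.length)]
        · have hk' : k = parent.length := by simp at hk; omega
          subst hk'
          rw [lzwRes_new parent lastC hwf hlast prevH _ hμ, ← hcur]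
          refine ⟨by simp, ?_⟩
          rw [getD_zero_append _ _ _ hcurne.1, hcurne.2, ← hfirst,
            List.getD_append_right _ _ _ _ (le_refl _)]
          simp
      · rfl
    · by_cases hmid : 0 ≤ code ∧ code < size
      · -- multi-char dictionary entry, prevH' = inr k
        have h256 : 256 ≤ code := by omega
        have hk : (code - 256).toNat < parent.length := by omega
        have hμk : lzwMu (Sum.inr (code - 256).toNat) ≤ parent.length := by
          simp [lzwMu]; omega
        have hg : dict.get? code = some (lzwRes parent lastC (Sum.inr (code - 256).toNat)) := by
          rw [hdict code, if_pos hmid, lzwSB, if_neg (by omega)]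
        rw [hg, if_neg hsmall,
          if_pos (show (256:Int) ≤ code ∧ code < 256 + (parent.length : Int) from ⟨h256, by omega⟩)]
        have hSc := hhead (code - 256).toNat hk
        have hsB : lzwBResolve parent lastC (parent.length + 1) (Sum.inr (code - 256).toNat) []
            = lzwRes parent lastC (Sum.inr (code - 256).toNat) := rfl
        rw [hsB]
        apply ih
        · simp; omega
        · simp [hlast]
        · simp [hfirst]
        · rw [hro]
        · exact lzwWF_append parent prevH hwf hμ
        · simp [lzwMu]; omega
        · intro c
          rw [PySem.Dict.get?_insert]
          by_cases hcs : c = size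
          · rw [if_pos hcs, if_pos ⟨by omega, by omega⟩, lzwSB, if_neg (by omega)]
            have hi : (c - 256).toNat = parent.length := by omega
            rw [hi, lzwRes_new parent lastC hwf hlast prevH _ hμ, ← hcur]
          · rw [if_neg hcs, hdict c]
            by_cases hc2 : 0 ≤ c ∧ c < size
            · rw [if_pos hc2, if_pos ⟨hc2.1, by omega⟩]
              unfold lzwSB
              by_cases hc256 : c < 256
              · rw [if_pos hc256, if_pos hc256]
              · rw [if_neg hc256, if_neg hc256,
                  lzwRes_append parent lastC hwf hlast prevH _ _ (by simp [lzwMu]; omega)]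
            · rw [if_neg hc2, if_neg (by omega)]
        · exact (lzwRes_append parent lastC hwf hlast prevH _ _ hμk).symm
        · intro k hkl1
          by_cases hkl : k < parent.length
          · rw [lzwRes_append parent lastC hwf hlast prevH _ _ (by simp [lzwMu]; omega)]
            have hold := hhead k hkl
            refine ⟨hold.1, ?_⟩
            rw [hold.2, List.getD_append _ _ _ _ (by omega : k < firstC.length)]
          · have hk' : k = parent.length := by simp at hkl1; omega
            subst hk'
            rw [lzwRes_new parent lastC hwf hlast prevH _ hμ, ← hcur]
            refine ⟨by simp, ?_⟩
            rw [getD_zero_append _ _ _ hcurne.1, hcurne.2, ← hfirst,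
              List.getD_append_right _ _ _ _ (le_refl _)]
            simp
        · show firstC.getD (code - 256).toNat ' ' = (firstC ++ [prevF]).getD (code - 256).toNat ' '
          rw [List.getD_append _ _ _ _ (by omega : (code - 256).toNat < firstC.length)]
      · -- not in the dictionary
        have hg : dict.get? code = none := by rw [hdict code, if_neg hmid]
        rw [hg, if_neg hsmall, if_neg (by omega : ¬ (256 ≤ code ∧ code < 256 + (parent.length : Int)))]
        by_cases hcs : code = size
        · -- code == dict_size
          rw [if_pos hcs, if_pos (by omega : code = 256 + (parent.length : Int))]
          have hsB : lzwBResolve parent lastC (parent.length + 1) prevH []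
              = lzwRes parent lastC prevH := rfl
          rw [hsB, ← hcur]
          have hx : PySem.List.pyGetD current 0 ' ' = prevF := by
            rw [PySem.List.pyGetD_zero, hcurne.2]
          rw [hx]
          have hxs : PySem.List.pyGetD (current ++ [prevF]) 0 ' ' = prevF := by
            rw [PySem.List.pyGetD_zero, getD_zero_append _ _ _ hcurne.1, hcurne.2]
          rw [hxs]
          apply ih
          · simp; omega
          · simp [hlast]
          · simp [hfirst]
          · rw [hro]
          · exact lzwWF_append parent prevH hwf hμ
          · simp [lzwMu]
          · intro c
            rw [PySem.Dict.get?_insert]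
            by_cases hc : c = size
            · rw [if_pos hc, if_pos ⟨by omega, by omega⟩, lzwSB, if_neg (by omega)]
              have hi : (c - 256).toNat = parent.length := by omega
              rw [hi, lzwRes_new parent lastC hwf hlast prevH _ hμ, ← hcur]
            · rw [if_neg hc, hdict c]
              by_cases hc2 : 0 ≤ c ∧ c < size
              · rw [if_pos hc2, if_pos ⟨hc2.1, by omega⟩]
                unfold lzwSB
                by_cases hc256 : c < 256
                · rw [if_pos hc256, if_pos hc256]
                · rw [if_neg hc256, if_neg hc256,
                    lzwRes_append parent lastC hwf hlast prevH _ _ (by simp [lzwMu]; omega)]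
              · rw [if_neg hc2, if_neg (by omega)]
          · rw [lzwRes_new parent lastC hwf hlast prevH _ hμ, ← hcur]
          · intro k hkl1
            by_cases hkl : k < parent.length
            · rw [lzwRes_append parent lastC hwf hlast prevH _ _ (by simp [lzwMu]; omega)]
              have hold := hhead k hkl
              refine ⟨hold.1, ?_⟩
              rw [hold.2, List.getD_append _ _ _ _ (by omega : k < firstC.length)]
            · have hk' : k = parent.length := by simp at hkl1; omega
              subst hk'
              rw [lzwRes_new parent lastC hwf hlast prevH _ hμ, ← hcur]
              refine ⟨by simp, ?_⟩
              rw [getD_zero_append _ _ _ hcurne.1, hcurne.2, ← hfirst,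
                List.getD_append_right _ _ _ _ (le_refl _)]
              simp
          · show prevF = lzwF (firstC ++ [prevF]) (Sum.inr parent.length)
            simp only [lzwF]
            rw [← hfirst, List.getD_append_right _ _ _ _ (le_refl _)]
            simp
        · -- ValueError branch: both return the accumulated output
          rw [if_neg hcs, if_neg (by omega : ¬ code = 256 + (parent.length : Int))]
          exact hro

-- ===== VERDICT (by name: the statement is the Claim_ definition above) =====
theorem lzw_decode_spec : Claim_equal_lzw_decode := by
  intro encoded _ hpre
  unfold Spec_lzw_decode
  obtain ⟨hne, -, -, -, -⟩ := hpre
  cases encoded with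
  | nil => exact absurd rfl hne
  | cons e0 rest =>
    unfold lzw_decode lzw_decode_alt
    refine congrArg String.ofList (congrArg (PySem.Chars.join []) ?_)
    refine lzw_loop_eq rest lzwAInit 256 [[lzwChr e0]] [lzwChr e0] [] [] []
      (Sum.inl (lzwChr e0)) (lzwChr e0) [[lzwChr e0]] (by simp) rfl rfl rfl ?_ (by simp [lzwMu]) ?_ ?_ ?_ rfl
    · intro k h
      simp at h
    · intro c
      rw [lzwAInit_get?]
      by_cases hc : 0 ≤ c ∧ c < 256
      · rw [if_pos hc, if_pos hc, lzwSB, if_pos hc.2]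
      · rw [if_neg hc, if_neg hc]
    · rw [lzwRes_inl]
    · intro k hk
      simp at hk
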